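-- pv_equiv track=rewrite | github.com/fh-igd-iet/FhSparseGen | FhSparseGen.py | is_valid_index_type
-- ===== SOURCE A (Python) =====
-- def is_valid_index_type(index_type):
--     """
--     Checks if the index_type is a valid C/C++ integrated integer type
--     """
--     from itertools import product
--
--     if index_type != index_type.strip():
--         return False
--
--     valid_index_types = []
--
--     intrinsic_parts = [
--         ['unsigned ', 'signed ', ''],
--         ['char', 'short', 'int', 'long', 'long long']
--     ]
--     for elts in product(*intrinsic_parts):
--         valid_index_types.append(''.join(elts))
--     valid_index_types.append('unsigned')
--     valid_index_types.append('signed')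
--
--     sized_parts = [
--         ['std::', ''],
--         ['int', 'uint'],
--         ['', '_fast', '_least'],
--         ['8_t', '16_t', '32_t', '64_t']
--     ]
--     for elts in product(*sized_parts):
--         valid_index_types.append(''.join(elts))
--
--     max_ptr_parts = [
--         ['std::', ''],
--         ['int', 'uint'],
--         ['max_t', 'ptr_t']
--     ]
--     for elts in product(*max_ptr_parts):
--         valid_index_types.append(''.join(elts))
--
--     size_diff_parts = [
--         ['std::', ''],
--         ['size_t', 'ptrdiff_t']
--     ]
--     for elts in product(*size_diff_parts):
--         valid_index_types.append(''.join(elts))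
--
--     valid_index_types = set(valid_index_types)
--
--     return index_type in valid_index_types
-- ===== SOURCE B (Python) =====
-- def _match(s):
--     """Recognize a stripped candidate by grammar decomposition."""
--     # bare sign keywords
--     if s == 'unsigned' or s == 'signed':
--         return True
--     # intrinsic family: optional sign prefix + base word
--     if s.startswith('unsigned '):
--         base = s[9:]
--     elif s.startswith('signed '):
--         base = s[7:]
--     else:
--         base = s
--     if base in ('char', 'short', 'int', 'long', 'long long'):
--         return True
--     # std:: families: optional namespace + size/ptrdiff/max/ptr/sized names
--     t = s[5:] if s.startswith('std::') else s
--     if t in ('size_t', 'ptrdiff_t', 'intmax_t', 'intptr_t', 'uintmax_t', 'uintptr_t'):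
--         return True
--     if t.startswith('uint'):
--         u = t[4:]
--     elif t.startswith('int'):
--         u = t[3:]
--     else:
--         return False
--     if u.startswith('_fast'):
--         v = u[5:]
--     elif u.startswith('_least'):
--         v = u[6:]
--     else:
--         v = u
--     return v in ('8_t', '16_t', '32_t', '64_t')
--
--
-- def is_valid_index_type(index_type):
--     """
--     Checks if the index_type is a valid C/C++ integrated integer type
--     """
--     if index_type != index_type.strip():
--         return False
--     return _match(index_type)
-- ===== Notes on version B (the rewrite author's own statement) =====
-- stated objective: idiomatic
-- what changed: Instead of enumerating all 77 spellings with itertools.product into a set and testing membership, B recognizes the string by grammar decomposition: it peels an optional sign-keyword or namespace prefix with startswith/slicing and checks the remaining base word or sized-family suffix.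
import Mathlib
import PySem

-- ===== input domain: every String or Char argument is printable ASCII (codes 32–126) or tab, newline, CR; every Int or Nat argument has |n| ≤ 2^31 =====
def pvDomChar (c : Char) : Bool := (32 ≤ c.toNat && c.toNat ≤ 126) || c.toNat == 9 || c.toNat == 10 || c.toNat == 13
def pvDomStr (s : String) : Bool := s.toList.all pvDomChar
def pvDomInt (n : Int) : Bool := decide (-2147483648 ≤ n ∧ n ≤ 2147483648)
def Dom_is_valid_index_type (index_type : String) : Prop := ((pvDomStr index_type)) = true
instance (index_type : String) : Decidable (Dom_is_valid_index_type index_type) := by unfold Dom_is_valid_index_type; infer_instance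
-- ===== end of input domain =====

-- B replaces A's itertools.product enumeration of all 77 spellings into a set by a grammar
-- decomposition (peel the optional sign-keyword or namespace prefix, check the remainder);
-- objective: idiomatic recognition instead of exhaustive enumeration, same results.

-- ===== PORT A =====
def is_valid_index_type (index_type : String) : Bool :=
  if index_type != PySem.Str.strip index_type then false
  else
    -- for elts in product(*intrinsic_parts): append ''.join(elts)
    let valid1 : List String :=
      ["unsigned ", "signed ", ""].flatMap (fun a =>
        ["char", "short", "int", "long", "long long"].map (fun b => PySem.Str.join "" [a, b]))
    let valid2 := valid1 ++ ["unsigned"] ++ ["signed"]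
    -- sized_parts
    let valid3 := valid2 ++ (["std::", ""].flatMap (fun a => ["int", "uint"].flatMap (fun b =>
        ["", "_fast", "_least"].flatMap (fun c => ["8_t", "16_t", "32_t", "64_t"].map (fun d =>
          PySem.Str.join "" [a, b, c, d])))))
    -- max_ptr_parts
    let valid4 := valid3 ++ (["std::", ""].flatMap (fun a => ["int", "uint"].flatMap (fun b =>
        ["max_t", "ptr_t"].map (fun c => PySem.Str.join "" [a, b, c]))))
    -- size_diff_parts
    let valid5 := valid4 ++ (["std::", ""].flatMap (fun a => ["size_t", "ptrdiff_t"].map (fun b =>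
        PySem.Str.join "" [a, b])))
    let validSet := PySem.Set.ofList valid5
    List.contains validSet index_type

-- ===== PORT B =====
-- _match(s) of Source B: grammar decomposition of a stripped candidate
def ivt_match (s : String) : Bool :=
  if s == "unsigned" || s == "signed" then true
  else
    let base := if PySem.Str.startswith s "unsigned " then PySem.Str.slice s (some 9) none
      else if PySem.Str.startswith s "signed " then PySem.Str.slice s (some 7) none
      else s
    if ["char", "short", "int", "long", "long long"].contains base then true
    else
      let t := if PySem.Str.startswith s "std::" then PySem.Str.slice s (some 5) none else s
      if ["size_t", "ptrdiff_t", "intmax_t", "intptr_t", "uintmax_t", "uintptr_t"].contains t then true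
      else
        -- u assigned in the if/elif, 'return False' in the else, encoded as an Option
        let u? : Option String :=
          if PySem.Str.startswith t "uint" then some (PySem.Str.slice t (some 4) none)
          else if PySem.Str.startswith t "int" then some (PySem.Str.slice t (some 3) none)
          else none
        match u? with
        | none => false
        | some u =>
          let v := if PySem.Str.startswith u "_fast" then PySem.Str.slice u (some 5) none
            else if PySem.Str.startswith u "_least" then PySem.Str.slice u (some 6) none
            else u
          ["8_t", "16_t", "32_t", "64_t"].contains v

def is_valid_index_type_alt (index_type : String) : Bool :=
  if index_type != PySem.Str.strip index_type then false
  else ivt_match index_type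

-- ===== PRECONDITION & SPEC =====
def Spec_is_valid_index_type (index_type : String) (out : Bool) : Prop := out = is_valid_index_type_alt index_type
instance (index_type : String) (out : Bool) : Decidable (Spec_is_valid_index_type index_type out) := by unfold Spec_is_valid_index_type; infer_instance

-- ===== CLAIM (what is proved, stated in full; the proofs are below) =====
def Claim_equal_is_valid_index_type : Prop := ∀ (index_type : String), Dom_is_valid_index_type index_type → Spec_is_valid_index_type index_type (is_valid_index_type index_type)

-- ===== LEMMAS AND PROOFS =====

-- the 77 valid spellings, in A's construction order (no duplicates, so set() keeps them all)
def pvValidList : List String := ["unsigned char", "unsigned short", "unsigned int", "unsigned long", "unsigned long long", "signed char", "signed short", "signed int", "signed long", "signed long long", "char", "short", "int", "long", "long long", "unsigned", "signed", "std::int8_t", "std::int16_t", "std::int32_t", "std::int64_t", "std::int_fast8_t", "std::int_fast16_t", "std::int_fast32_t", "std::int_fast64_t", "std::int_least8_t", "std::int_least16_t", "std::int_least32_t", "std::int_least64_t", "std::uint8_t", "std::uint16_t", "std::uint32_t", "std::uint64_t", "std::uint_fast8_t", "std::uint_fast16_t", "std::uint_fast32_t", "std::uint_fast64_t", "std::uint_least8_t",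 "std::uint_least16_t", "std::uint_least32_t", "std::uint_least64_t", "int8_t", "int16_t", "int32_t", "int64_t", "int_fast8_t", "int_fast16_t", "int_fast32_t", "int_fast64_t", "int_least8_t", "int_least16_t", "int_least32_t", "int_least64_t", "uint8_t", "uint16_t", "uint32_t", "uint64_t", "uint_fast8_t", "uint_fast16_t", "uint_fast32_t", "uint_fast64_t", "uint_least8_t", "uint_least16_t", "uint_least32_t", "uint_least64_t", "std::intmax_t", "std::intptr_t", "std::uintmax_t", "std::uintptr_t", "intmax_t", "intptr_t", "uintmax_t", "uintptr_t", "std::size_t", "std::ptrdiff_t", "size_t", "ptrdiff_t"]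

-- the spellings valid after the (optional, already removed) namespace prefix
def pvStdList : List String := ["size_t", "ptrdiff_t", "intmax_t", "intptr_t", "uintmax_t", "uintptr_t", "uint8_t", "uint16_t", "uint32_t", "uint64_t", "uint_fast8_t", "uint_fast16_t", "uint_fast32_t", "uint_fast64_t", "uint_least8_t", "uint_least16_t", "uint_least32_t", "uint_least64_t", "int8_t", "int16_t", "int32_t", "int64_t", "int_fast8_t", "int_fast16_t", "int_fast32_t", "int_fast64_t", "int_least8_t", "int_least16_t", "int_least32_t", "int_least64_t"]

-- the suffixes valid after the (already removed) uint/int stem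
def pvSuffixList : List String := ["8_t", "16_t", "32_t", "64_t", "_fast8_t", "_fast16_t", "_fast32_t", "_fast64_t", "_least8_t", "_least16_t", "_least32_t", "_least64_t"]

set_option maxRecDepth 8192 in
set_option maxHeartbeats 1000000 in
lemma pvA_unfold (s : String) :
    is_valid_index_type s = (if s != PySem.Str.strip s then false else pvValidList.contains s) := rfl

-- if p is a prefix of s then s = p ++ s[len(p):]
lemma pvSplit_of_startswith (s p : String) (n : Int) (hn : (p.toList.length : Int) = n)
    (hp : PySem.Str.startswith s p = true) :
    s = p ++ PySem.Str.slice s (some n) none := by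
  subst hn
  apply String.toList_inj.mp
  obtain ⟨t, ht⟩ := (PySem.Chars.startswith_iff _ _).mp (by simpa using hp)
  simp [PySem.List.slice_from _ (Int.natCast_nonneg _), ← ht]

lemma pvSized_mem (u : String)
    (h : (let v := if PySem.Str.startswith u "_fast" then PySem.Str.slice u (some 5) none
            else if PySem.Str.startswith u "_least" then PySem.Str.slice u (some 6) none
            else u
          (["8_t", "16_t", "32_t", "64_t"].contains v)) = true) :
    u ∈ pvSuffixList := by
  simp only [] at h
  by_cases p : PySem.Str.startswith u "_fast" = true
  · simp only [p, if_true] at h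
    have hm := List.mem_of_elem_eq_true h
    have hs := pvSplit_of_startswith u "_fast" 5 (by decide) p
    simp only [List.mem_cons, List.not_mem_nil, or_false] at hm
    rcases hm with h' | h' | h' | h' <;> rw [h'] at hs <;> rw [hs] <;> decide
  · rw [Bool.not_eq_true] at p
    simp only [p, Bool.false_eq_true, if_false] at h
    by_cases q : PySem.Str.startswith u "_least" = true
    · simp only [q, if_true] at h
      have hm := List.mem_of_elem_eq_true h
      have hs := pvSplit_of_startswith u "_least" 6 (by decide) q
      simp only [List.mem_cons, List.not_mem_nil, or_false] at hm
      rcases hm with h' | h' | h' | h' <;> rw [h'] at hs <;> rw [hs] <;> decide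
    · rw [Bool.not_eq_true] at q
      simp only [q, Bool.false_eq_true, if_false] at h
      have hm := List.mem_of_elem_eq_true h
      simp only [List.mem_cons, List.not_mem_nil, or_false] at hm
      rcases hm with rfl | rfl | rfl | rfl <;> decide

set_option maxRecDepth 8192 in
set_option maxHeartbeats 1000000 in
lemma pvBody_mem (t : String)
    (h : (if ["size_t", "ptrdiff_t", "intmax_t", "intptr_t", "uintmax_t", "uintptr_t"].contains t then true
          else
            let u? : Option String :=
              if PySem.Str.startswith t "uint" then some (PySem.Str.slice t (some 4) none)
              else if PySem.Str.startswith t "int" then some (PySem.Str.slice t (some 3) none)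
              else none
            match u? with
            | none => false
            | some u =>
              let v := if PySem.Str.startswith u "_fast" then PySem.Str.slice u (some 5) none
                else if PySem.Str.startswith u "_least" then PySem.Str.slice u (some 6) none
                else u
              ["8_t", "16_t", "32_t", "64_t"].contains v) = true) :
    t ∈ pvStdList := by
  by_cases m : (["size_t", "ptrdiff_t", "intmax_t", "intptr_t", "uintmax_t", "uintptr_t"].contains t) = true
  · have hm := List.mem_of_elem_eq_true m
    simp only [List.mem_cons, List.not_mem_nil, or_false] at hm
    rcases hm with rfl | rfl | rfl | rfl | rfl | rfl <;> decide
  · rw [Bool.not_eq_true] at m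
    simp only [m, Bool.false_eq_true, if_false] at h
    by_cases p : PySem.Str.startswith t "uint" = true
    · simp only [p, if_true] at h
      have hu := pvSized_mem _ h
      have hs := pvSplit_of_startswith t "uint" 4 (by decide) p
      rw [hs]
      exact (by decide : ∀ x ∈ pvSuffixList, ("uint" ++ x) ∈ pvStdList) _ hu
    · rw [Bool.not_eq_true] at p
      simp only [p, Bool.false_eq_true, if_false] at h
      by_cases q : PySem.Str.startswith t "int" = true
      · simp only [q, if_true] at h
        have hu := pvSized_mem _ h
        have hs := pvSplit_of_startswith t "int" 3 (by decide) q
        rw [hs]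
        exact (by decide : ∀ x ∈ pvSuffixList, ("int" ++ x) ∈ pvStdList) _ hu
      · rw [Bool.not_eq_true] at q
        simp only [q, Bool.false_eq_true, if_false] at h

set_option maxRecDepth 8192 in
set_option maxHeartbeats 1000000 in
lemma pvStd_stage (s : String)
    (h : (let t := if PySem.Str.startswith s "std::" then PySem.Str.slice s (some 5) none else s
          if ["size_t", "ptrdiff_t", "intmax_t", "intptr_t", "uintmax_t", "uintptr_t"].contains t then true
          else
            let u? : Option String :=
              if PySem.Str.startswith t "uint" then some (PySem.Str.slice t (some 4) none)
              else if PySem.Str.startswith t "int" then some (PySem.Str.slice t (some 3) none)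
              else none
            match u? with
            | none => false
            | some u =>
              let v := if PySem.Str.startswith u "_fast" then PySem.Str.slice u (some 5) none
                else if PySem.Str.startswith u "_least" then PySem.Str.slice u (some 6) none
                else u
              ["8_t", "16_t", "32_t", "64_t"].contains v) = true) :
    s ∈ pvValidList := by
  simp only [] at h
  by_cases q : PySem.Str.startswith s "std::" = true
  · simp only [q, if_true] at h
    have ht := pvBody_mem _ h
    have hs := pvSplit_of_startswith s "std::" 5 (by decide) q
    rw [hs]
    exact (by decide : ∀ x ∈ pvStdList, ("std::" ++ x) ∈ pvValidList) _ ht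
  · rw [Bool.not_eq_true] at q
    simp only [q, Bool.false_eq_true, if_false] at h
    exact (by decide : ∀ x ∈ pvStdList, x ∈ pvValidList) _ (pvBody_mem s h)

lemma pvMatch_mem (s : String) (h : ivt_match s = true) : s ∈ pvValidList := by
  unfold ivt_match at h
  by_cases c : (s == "unsigned" || s == "signed") = true
  · rcases Bool.or_eq_true_iff.mp c with h' | h' <;> rw [eq_of_beq h'] <;> decide
  · rw [Bool.not_eq_true] at c
    simp only [c, Bool.false_eq_true, if_false] at h
    by_cases p1 : PySem.Str.startswith s "unsigned " = true
    · simp only [p1, if_true] at h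
      by_cases m : (["char", "short", "int", "long", "long long"].contains (PySem.Str.slice s (some 9) none)) = true
      · have hm := List.mem_of_elem_eq_true m
        have hs := pvSplit_of_startswith s "unsigned " 9 (by decide) p1
        simp only [List.mem_cons, List.not_mem_nil, or_false] at hm
        rcases hm with h' | h' | h' | h' | h' <;> rw [h'] at hs <;> rw [hs] <;> decide
      · rw [Bool.not_eq_true] at m
        simp only [m, Bool.false_eq_true, if_false] at h
        exact pvStd_stage s h
    · rw [Bool.not_eq_true] at p1
      simp only [p1, Bool.false_eq_true, if_false] at h
      by_cases p2 : PySem.Str.startswith s "signed " = true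
      · simp only [p2, if_true] at h
        by_cases m : (["char", "short", "int", "long", "long long"].contains (PySem.Str.slice s (some 7) none)) = true
        · have hm := List.mem_of_elem_eq_true m
          have hs := pvSplit_of_startswith s "signed " 7 (by decide) p2
          simp only [List.mem_cons, List.not_mem_nil, or_false] at hm
          rcases hm with h' | h' | h' | h' | h' <;> rw [h'] at hs <;> rw [hs] <;> decide
        · rw [Bool.not_eq_true] at m
          simp only [m, Bool.false_eq_true, if_false] at h
          exact pvStd_stage s h
      · rw [Bool.not_eq_true] at p2
        simp only [p2, Bool.false_eq_true, if_false] at h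
        by_cases m : (["char", "short", "int", "long", "long long"].contains s) = true
        · have hm := List.mem_of_elem_eq_true m
          simp only [List.mem_cons, List.not_mem_nil, or_false] at hm
          rcases hm with rfl | rfl | rfl | rfl | rfl <;> decide
        · rw [Bool.not_eq_true] at m
          simp only [m, Bool.false_eq_true, if_false] at h
          exact pvStd_stage s h

set_option maxRecDepth 8192 in
set_option maxHeartbeats 1000000 in
lemma pvMem_match (s : String) (h : s ∈ pvValidList) : ivt_match s = true := by
  fin_cases h <;> decide

lemma pvContains_eq (s : String) : pvValidList.contains s = ivt_match s := by
  cases hm : ivt_match s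
  · cases hc : pvValidList.contains s
    · rfl
    · exact absurd (pvMem_match s (List.mem_of_elem_eq_true hc)) (by simp [hm])
  · exact List.elem_eq_true_of_mem (pvMatch_mem s hm)

-- ===== VERDICT (by name: the statement is the Claim_ definition above) =====
theorem is_valid_index_type_spec : Claim_equal_is_valid_index_type := by
  intro s _
  unfold Spec_is_valid_index_type is_valid_index_type_alt
  rw [pvA_unfold]
  by_cases g : (s != PySem.Str.strip s) = true
  · simp [g]
  · rw [Bool.not_eq_true] at g
    simp only [g, Bool.false_eq_true, if_false]
    exact pvContains_eq s
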